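-- pv_equiv track=rewrite | github.com/arunachalamev/PythonProgramming | Algorithms/DailyCodeChallenge/DC022reconstructWord.py | reconstructWord
-- ===== SOURCE A (Python) =====
-- def reconstructWord(words, string):
--     wordset = set(words)
--     temp = ''
--
--     result = list()
--
--     for index,char in enumerate(string):
--         temp  = temp + char
--
--         if temp in wordset:
--             result.append(temp)
--             temp = ''
--
--     if temp == '':
--         return result
--     else:
--         return None
-- ===== SOURCE B (Python) =====
-- def reconstructWord(words, string):
--     wordset = set(words)
--     n = len(string)
--     result = []
--     start = 0
--     while start < n:
--         end = start + 1
--         while end <= n and string[start:end] not in wordset: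
--             end += 1
--         if end > n:
--             return None
--         result.append(string[start:end])
--         start = end
--     return result
-- ===== Notes on version B (the rewrite author's own statement) =====
-- stated objective: alternative
-- what changed: Replaces A's single character-by-character fold with a mutable temp buffer by a segment/two-index greedy scan: an outer loop over word boundaries that finds the shortest end with string[start:end] in the set, appending whole slices and failing early when no prefix of the remaining suffix matches.
import Mathlib
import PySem

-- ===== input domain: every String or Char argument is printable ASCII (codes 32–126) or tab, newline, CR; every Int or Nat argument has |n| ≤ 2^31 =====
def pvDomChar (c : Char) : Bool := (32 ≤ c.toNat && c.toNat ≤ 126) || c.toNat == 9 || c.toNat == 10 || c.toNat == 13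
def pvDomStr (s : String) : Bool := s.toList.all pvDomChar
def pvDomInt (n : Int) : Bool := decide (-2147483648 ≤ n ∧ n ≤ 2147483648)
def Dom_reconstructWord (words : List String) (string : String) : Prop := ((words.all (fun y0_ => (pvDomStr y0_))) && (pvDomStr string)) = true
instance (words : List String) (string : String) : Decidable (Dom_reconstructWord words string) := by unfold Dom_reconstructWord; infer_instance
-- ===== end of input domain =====

-- ===== PORT A =====
-- B replaces A's char-by-char fold with a temp buffer by a segment scan over word boundaries (objective: alternative).
def reconstructWord (words : List String) (string : String) : Option (List String) :=
  let wordset := PySem.Set.ofList words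
  let st := string.toList.foldl
    (fun (st : List Char × List String) char =>
      let temp := st.1 ++ [char]
      if wordset.contains (String.mk temp) then ([], st.2 ++ [String.mk temp]) else (temp, st.2))
    ([], [])
  if st.1 = [] then some st.2 else none

-- ===== PORT B =====
-- inner while loop of B: scan end upward from start+1, growing the slice by one char,
-- until the slice is in wordset; returns the matched slice and the remaining suffix.
def pvFindPrefix (ws : List String) (pre suf : List Char) : Option (List Char × List Char) :=
  match suf with
  | [] => none
  | c :: rest =>
      let p := pre ++ [c]
      if ws.contains (String.mk p) then some (p, rest) else pvFindPrefix ws p rest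

theorem pvFindPrefix_length (ws : List String) :
    ∀ (suf pre p r : List Char),
      pvFindPrefix ws pre suf = some (p, r) → r.length < suf.length := by
  intro suf
  induction suf with
  | nil => intro pre p r h; simp [pvFindPrefix] at h
  | cons c rest ih =>
      intro pre p r h
      simp only [pvFindPrefix] at h
      split at h
      · simp only [Option.some.injEq, Prod.mk.injEq] at h
        rw [← h.2]; exact Nat.lt_succ_self _
      · exact Nat.lt_trans (ih _ _ _ h) (Nat.lt_succ_self _)

-- outer while loop of B: result accumulator, advance start past each matched slice.
def pvGoB (ws : List String) (s : List Char) (acc : List String) : Option (List String) :=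
  if h : s = [] then some acc
  else
    match h2 : pvFindPrefix ws [] s with
    | none => none
    | some (p, rest) => pvGoB ws rest (acc ++ [String.mk p])
termination_by s.length
decreasing_by exact pvFindPrefix_length ws s [] p rest h2

def reconstructWord_alt (words : List String) (string : String) : Option (List String) :=
  let wordset := PySem.Set.ofList words
  pvGoB wordset string.toList []

-- ===== PRECONDITION & SPEC =====
def Spec_reconstructWord (words : List String) (string : String) (out : Option (List String)) : Prop := out = reconstructWord_alt words string
instance (words : List String) (string : String) (out : Option (List String)) : Decidable (Spec_reconstructWord words string out) := by unfold Spec_reconstructWord; infer_instance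

-- ===== CLAIM (what is proved, stated in full; the proofs are below) =====
def Claim_equal_reconstructWord : Prop := ∀ (words : List String) (string : String), Dom_reconstructWord words string → Spec_reconstructWord words string (reconstructWord words string)

-- ===== LEMMAS AND PROOFS =====

-- A's loop body as a named step function (definitionally equal to the lambda in the port).
def pvStep (ws : List String) (st : List Char × List String) (char : Char) : List Char × List String :=
  if ws.contains (String.mk (st.1 ++ [char])) then ([], st.2 ++ [String.mk (st.1 ++ [char])])
  else (st.1 ++ [char], st.2)

theorem pvGoB_eq (ws : List String) (s : List Char) (acc : List String) :
    pvGoB ws s acc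
      = match pvFindPrefix ws [] s with
        | none => if s = [] then some acc else none
        | some (p, rest) => pvGoB ws rest (acc ++ [String.mk p]) := by
  rw [pvGoB]
  by_cases h : s = []
  · subst h; simp [pvFindPrefix]
  · simp only [h, dite_false]
    rcases hf : pvFindPrefix ws [] s with _ | ⟨p, r⟩ <;> simp

theorem pvLoop_eq (ws : List String) :
    ∀ (cs temp : List Char) (acc : List String),
      (if (List.foldl (pvStep ws) (temp, acc) cs).1 = []
       then some (List.foldl (pvStep ws) (temp, acc) cs).2 else none)
      = match pvFindPrefix ws temp cs with
        | none => if temp = [] ∧ cs = [] then some acc else none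
        | some (p, rest) => pvGoB ws rest (acc ++ [String.mk p]) := by
  intro cs
  induction cs with
  | nil => intro temp acc; simp [pvFindPrefix]
  | cons c rest ih =>
      intro temp acc
      rw [List.foldl_cons]
      by_cases h : String.mk (temp ++ [c]) ∈ ws
      · have hs : pvStep ws (temp, acc) c = ([], acc ++ [String.mk (temp ++ [c])]) := by
          simp [pvStep, h]
        have hf2 : pvFindPrefix ws temp (c :: rest) = some (temp ++ [c], rest) := by
          simp [pvFindPrefix, h]
        rw [hs, ih, hf2]
        rcases hf : pvFindPrefix ws [] rest with _ | ⟨p, r⟩ <;>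
          simp [pvGoB_eq ws rest (acc ++ [String.mk (temp ++ [c])]), hf]
      · have hs : pvStep ws (temp, acc) c = (temp ++ [c], acc) := by simp [pvStep, h]
        have hf2 : pvFindPrefix ws temp (c :: rest) = pvFindPrefix ws (temp ++ [c]) rest := by
          simp [pvFindPrefix, h]
        rw [hs, ih, hf2]
        rcases hf : pvFindPrefix ws (temp ++ [c]) rest with _ | ⟨p, r⟩ <;> simp

-- ===== VERDICT (by name: the statement is the Claim_ definition above) =====
theorem reconstructWord_spec : Claim_equal_reconstructWord := by
  intro words string _
  show reconstructWord words string = reconstructWord_alt words string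
  have hA : reconstructWord words string =
      (if (List.foldl (pvStep (PySem.Set.ofList words)) ([], []) string.toList).1 = []
       then some (List.foldl (pvStep (PySem.Set.ofList words)) ([], []) string.toList).2
       else none) := rfl
  have hB : reconstructWord_alt words string = pvGoB (PySem.Set.ofList words) string.toList [] := rfl
  rw [hA, hB, pvLoop_eq, pvGoB_eq]
  rcases hf : pvFindPrefix (PySem.Set.ofList words) [] string.toList with _ | ⟨p, r⟩ <;> simp
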